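-- pv_equiv track=rewrite | github.com/Igris-1/Fundamentos-de-programacion | Fifteen/logica.py | inicializar_tablero
-- ===== SOURCE A (Python) =====
-- def inicializar_tablero(TAMANIO):
--     """DOC: Inicializa un tablero de tamaño 'TAMANIO'x'TAMANIO'"""
--     tablero = []
--     for fila in range(TAMANIO[1]):
--         tablero.append([])
--         for columna in range(TAMANIO[0]):
--             tablero[fila].append(fila * TAMANIO[0] + columna + 1)
--     tablero[-1][-1] = 0
--     return tablero
-- ===== SOURCE B (Python) =====
-- def inicializar_tablero(TAMANIO):
--     """DOC: Inicializa un tablero de tamaño 'TAMANIO'x'TAMANIO'"""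
--     cols = TAMANIO[0]
--     nums = list(range(1, cols * TAMANIO[1] + 1))
--     nums[-1] = 0
--     return [nums[i * cols:(i + 1) * cols] for i in range(TAMANIO[1])]
-- ===== Notes on version B (the rewrite author's own statement) =====
-- stated objective: alternative
-- what changed: Replaces per-cell nested loops with index arithmetic by a one-shot flat range(1, cols*rows+1) whose last entry is zeroed, then reshaped into rows by slicing.
import Mathlib
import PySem

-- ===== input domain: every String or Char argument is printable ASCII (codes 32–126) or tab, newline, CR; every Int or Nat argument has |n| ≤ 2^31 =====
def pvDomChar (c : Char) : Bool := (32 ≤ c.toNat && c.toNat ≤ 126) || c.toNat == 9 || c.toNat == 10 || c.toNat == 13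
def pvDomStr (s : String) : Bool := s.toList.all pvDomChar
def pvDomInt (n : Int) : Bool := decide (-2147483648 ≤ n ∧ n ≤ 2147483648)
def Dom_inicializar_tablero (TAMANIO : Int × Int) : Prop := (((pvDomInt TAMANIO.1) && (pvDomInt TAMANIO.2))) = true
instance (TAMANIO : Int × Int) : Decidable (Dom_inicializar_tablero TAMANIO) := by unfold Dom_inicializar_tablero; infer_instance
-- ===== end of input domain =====

-- B replaces A's per-cell nested loops by a flat sequential list (last entry zeroed) reshaped into rows by slicing; return-value equivalence proved on sizes where A returns (both components positive).

-- ===== PORT A =====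
-- tablero[-1][-1] = 0: sets the last element of the last row to 0; Python raises
-- IndexError when tablero or its last row is empty — those inputs are outside Pre_,
-- there the helper returns its argument unchanged.
def pySetLastLast (t : List (List Int)) : List (List Int) :=
  match t.getLast? with
  | none => t
  | some r =>
    match r.getLast? with
    | none => t
    | some _ => t.dropLast ++ [r.dropLast ++ [0]]

def inicializar_tablero (TAMANIO : Int × Int) : List (List Int) :=
  -- for fila in range(TAMANIO[1]): append []; for columna in range(TAMANIO[0]): append fila*TAMANIO[0]+columna+1
  let tablero :=
    (PySem.List.pyRange 0 TAMANIO.2 1).foldl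
      (fun tab fila =>
        tab ++ [(PySem.List.pyRange 0 TAMANIO.1 1).foldl
                  (fun row columna => row ++ [fila * TAMANIO.1 + columna + 1]) []])
      []
  pySetLastLast tablero

-- ===== PORT B =====
def inicializar_tablero_alt (TAMANIO : Int × Int) : List (List Int) :=
  let cols := TAMANIO.1
  let nums := PySem.List.pyRange 1 (cols * TAMANIO.2 + 1) 1
  -- nums[-1] = 0 (IndexError on empty nums, outside Pre_; then left unchanged)
  let nums2 := if nums.isEmpty then nums else nums.dropLast ++ [0]
  (PySem.List.pyRange 0 TAMANIO.2 1).map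
    (fun i => PySem.List.slice nums2 (some (i * cols)) (some ((i + 1) * cols)))

-- ===== PRECONDITION & SPEC =====
-- Pre_ excludes exactly the sizes on which A raises IndexError at tablero[-1][-1]:
-- a non-positive row or column count.
def Pre_inicializar_tablero (TAMANIO : Int × Int) : Prop := 0 < TAMANIO.1 ∧ 0 < TAMANIO.2
instance (TAMANIO : Int × Int) : Decidable (Pre_inicializar_tablero TAMANIO) := by unfold Pre_inicializar_tablero; infer_instance
def pvWitness_inicializar_tablero : (Int × Int) := (3, 2)

def Spec_inicializar_tablero (TAMANIO : Int × Int) (out : List (List Int)) : Prop := out = inicializar_tablero_alt TAMANIO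
instance (TAMANIO : Int × Int) (out : List (List Int)) : Decidable (Spec_inicializar_tablero TAMANIO out) := by unfold Spec_inicializar_tablero; infer_instance

-- ===== CLAIM (what is proved, stated in full; the proofs are below) =====
def Claim_equal_inicializar_tablero : Prop := ∀ (TAMANIO : Int × Int), Dom_inicializar_tablero TAMANIO → Pre_inicializar_tablero TAMANIO → Spec_inicializar_tablero TAMANIO (inicializar_tablero TAMANIO)
-- ===== LEMMAS AND PROOFS =====

lemma foldl_app_map (l : List Int) (f : Int → List Int) : l.foldl (fun acc x => acc ++ [f x]) [] = l.map f := by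
  have := PySem.List.foldl_append_singleton_eq_map (f := f) (l := l) (acc := [])
  simpa using this

lemma foldl_app_map' (l : List Int) (f : Int → Int) : l.foldl (fun acc x => acc ++ [f x]) [] = l.map f := by
  have := PySem.List.foldl_append_singleton_eq_map (f := f) (l := l) (acc := [])
  simpa using this

lemma shift (a d : Int) : PySem.List.pyRange (1+a) (1+a+d) 1 = (PySem.List.pyRange 0 d 1).map (fun col => a + col + 1) := by
  rw [PySem.List.pyRange_one, PySem.List.pyRange_one, List.map_map]
  have h : (1+a+d - (1+a)) = d - 0 := by ring
  rw [h]
  apply List.map_congr_left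
  intro k _
  simp
  ring

lemma range_concat (b : Int) (hb : 0 < b) :
    PySem.List.pyRange 0 b 1 = PySem.List.pyRange 0 (b-1) 1 ++ [b-1] := by
  have h := PySem.List.pyRange_one_succ_right (a := 0) (b := b-1) (by omega)
  have h2 : b - 1 + 1 = b := by ring
  rw [h2] at h
  exact h

lemma lemA (c r : Int) (hc : 0 < c) (hr : 0 < r) :
    pySetLastLast
      ((PySem.List.pyRange 0 r 1).foldl
        (fun tab fila =>
          tab ++ [(PySem.List.pyRange 0 c 1).foldl
                    (fun row columna => row ++ [fila * c + columna + 1]) []]) []) =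
    (PySem.List.pyRange 0 (r-1) 1).map (fun f => (PySem.List.pyRange 0 c 1).map (fun col => f*c+col+1))
      ++ [ (PySem.List.pyRange 0 (c-1) 1).map (fun col => (r-1)*c+col+1) ++ [0] ] := by
  have hinner : ∀ f : Int, (PySem.List.pyRange 0 c 1).foldl
      (fun row columna => row ++ [f * c + columna + 1]) [] =
      (PySem.List.pyRange 0 c 1).map (fun col => f*c+col+1) := fun f => foldl_app_map' _ _
  simp only [hinner, foldl_app_map]
  rw [range_concat r hr, List.map_append, List.map_singleton]
  have hlastrow : (PySem.List.pyRange 0 c 1).map (fun col => (r-1)*c+col+1) =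
      (PySem.List.pyRange 0 (c-1) 1).map (fun col => (r-1)*c+col+1) ++ [(r-1)*c+(c-1)+1] := by
    rw [range_concat c hc, List.map_append, List.map_singleton]
  rw [hlastrow]
  unfold pySetLastLast
  rw [List.getLast?_concat]
  simp only []
  rw [List.getLast?_concat]
  simp only [List.dropLast_concat]

lemma row_slice (c r i : Int) (hc : 0 < c) (_hr : 0 < r) (hi : 0 ≤ i) (hir : i < r) :
    PySem.List.slice (PySem.List.pyRange 1 (c*r) 1 ++ [0]) (some (i*c)) (some ((i+1)*c)) =
    if i < r - 1 then (PySem.List.pyRange 0 c 1).map (fun col => i*c+col+1)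
    else (PySem.List.pyRange 0 (c-1) 1).map (fun col => i*c+col+1) ++ [0] := by
  have hic : 0 ≤ i * c := mul_nonneg hi (le_of_lt hc)
  have hi1c : 0 ≤ (i+1) * c := mul_nonneg (by omega) (le_of_lt hc)
  rw [PySem.List.slice_toNat _ hic hi1c]
  have htake : ((i+1)*c).toNat - (i*c).toNat = c.toNat := by
    have h1 : (i+1)*c = i*c + c := by ring
    rw [h1]
    omega
  rw [htake]
  have hsplit1 : PySem.List.pyRange 1 (c*r) 1 =
      PySem.List.pyRange 1 (1+i*c) 1 ++ PySem.List.pyRange (1+i*c) (c*r) 1 := by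
    apply PySem.List.pyRange_one_append
    · omega
    · nlinarith
  have hlen1 : (PySem.List.pyRange 1 (1+i*c) 1).length = (i*c).toNat := by
    rw [PySem.List.length_pyRange_one]; omega
  rw [hsplit1, List.append_assoc, List.drop_left' hlen1]
  by_cases hcase : i < r - 1
  · rw [if_pos hcase]
    have hsplit2 : PySem.List.pyRange (1+i*c) (c*r) 1 =
        PySem.List.pyRange (1+i*c) (1+i*c+c) 1 ++ PySem.List.pyRange (1+i*c+c) (c*r) 1 := by
      apply PySem.List.pyRange_one_append
      · omega
      · nlinarith
    have hlen2 : (PySem.List.pyRange (1+i*c) (1+i*c+c) 1).length = c.toNat := by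
      rw [PySem.List.length_pyRange_one]; omega
    rw [hsplit2, List.append_assoc, List.take_left' hlen2, shift]
  · rw [if_neg hcase]
    have hieq : i = r - 1 := by omega
    subst hieq
    have harith : c * r = 1 + (r-1)*c + (c-1) := by ring
    have hY : PySem.List.pyRange (1+(r-1)*c) (c*r) 1 =
        (PySem.List.pyRange 0 (c-1) 1).map (fun col => (r-1)*c+col+1) := by
      rw [harith, shift]
    have hlenY : (PySem.List.pyRange (1+(r-1)*c) (c*r) 1).length = (c-1).toNat := by
      rw [PySem.List.length_pyRange_one]
      have : c * r - (1 + (r-1)*c) = c - 1 := by ring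
      rw [this]
    rw [List.take_of_length_le, hY]
    rw [List.length_append, hlenY]
    simp
    omega

lemma lemB (c r : Int) (hc : 0 < c) (hr : 0 < r) :
    inicializar_tablero_alt (c, r) =
    (PySem.List.pyRange 0 (r-1) 1).map (fun f => (PySem.List.pyRange 0 c 1).map (fun col => f*c+col+1))
      ++ [ (PySem.List.pyRange 0 (c-1) 1).map (fun col => (r-1)*c+col+1) ++ [0] ] := by
  have hcr : 0 < c * r := mul_pos hc hr
  unfold inicializar_tablero_alt
  simp only []
  have hne : (PySem.List.pyRange 1 (c * r + 1) 1).isEmpty = false := by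
    rw [List.isEmpty_eq_false_iff, ← List.length_pos_iff, PySem.List.length_pyRange_one]
    omega
  rw [hne]
  simp only [Bool.false_eq_true, if_false]
  have hnums : PySem.List.pyRange 1 (c * r + 1) 1 =
      PySem.List.pyRange 1 (c*r) 1 ++ [c*r] :=
    PySem.List.pyRange_one_succ_right (by omega)
  rw [hnums, List.dropLast_concat]
  rw [range_concat r hr, List.map_append, List.map_singleton]
  congr 1
  · apply List.map_congr_left
    intro i hi
    rw [PySem.List.mem_pyRange_one] at hi
    rw [row_slice c r i hc hr hi.1 (by omega), if_pos (by omega)]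
  · rw [row_slice c r (r-1) hc hr (by omega) (by omega), if_neg (by omega)]

theorem main_equiv : ∀ (TAMANIO : Int × Int), Pre_inicializar_tablero TAMANIO → inicializar_tablero TAMANIO = inicializar_tablero_alt TAMANIO := by
  rintro ⟨c, r⟩ ⟨hc, hr⟩
  exact (lemA c r hc hr).trans (lemB c r hc hr).symm

-- ===== VERDICT (by name: the statement is the Claim_ definition above) =====
theorem inicializar_tablero_spec : Claim_equal_inicializar_tablero := by
  intro T _ hpre
  exact main_equiv T hpre
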